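-- pv_equiv track=rewrite | github.com/rachelmetzgar/AI_mind_rep | exp_1/code/utils/subject_utils.py | find_old_id
-- ===== SOURCE A (Python) =====
-- _SUB_ID_MAP = {
--     "P08": "sub-001", "s08": "sub-001",
--     "P12": "sub-002", "s12": "sub-002",
--     "P13": "sub-003", "s13": "sub-003",
--     "P14": "sub-004", "s14": "sub-004",
--     "P15": "sub-005", "s15": "sub-005",
--     "P16": "sub-006", "s16": "sub-006",
--     "P17": "sub-007", "s17": "sub-007",
--     "P18": "sub-008", "s18": "sub-008",
--     "P20": "sub-009", "s20": "sub-009",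
--     "P21": "sub-010", "s21": "sub-010",
--     "P22": "sub-011", "s22": "sub-011",
--     "P24": "sub-012", "s24": "sub-012",
--     "P25": "sub-013", "s25": "sub-013",
--     "P26": "sub-014", "s26": "sub-014",
--     "P27": "sub-015", "s27": "sub-015",
--     "P28": "sub-016", "s28": "sub-016",
--     "P30": "sub-017", "s30": "sub-017",
--     "P31": "sub-018", "s31": "sub-018",
--     "P32": "sub-019", "s32": "sub-019",
--     "P33": "sub-020", "s33": "sub-020",
--     "P34": "sub-021", "s34": "sub-021",
--     "P35": "sub-022", "s35": "sub-022",
--     "P36": "sub-023", "s36": "sub-023",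
-- }
--
-- def find_old_id(new_id: str) -> str | None:
--     old_ids = [k for k, v in _SUB_ID_MAP.items() if v == new_id]
--     if not old_ids:
--         return None
--     for old in old_ids:
--         if old.startswith("s"):
--             return old
--     return old_ids[0]
-- ===== SOURCE B (Python) =====
-- # Every new id sub-%03d (i = 1..23) has exactly two old ids, 'P<nn>' and 's<nn>',
-- # and A always prefers the 's' one; so B keeps only the numeric table and
-- # reconstructs the preferred old id arithmetically instead of scanning the map.
-- _OLD_NUMS = [8, 12, 13, 14, 15, 16, 17, 18, 20, 21, 22, 24,
--              25, 26, 27, 28, 30, 31, 32, 33, 34, 35, 36]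
--
-- def find_old_id(new_id: str):
--     for i, n in enumerate(_OLD_NUMS, start=1):
--         if new_id == "sub-%03d" % i:
--             return "s%02d" % n
--     return None
-- ===== Notes on version B (the rewrite author's own statement) =====
-- stated objective: alternative
-- what changed: B drops the forward map entirely: it stores only the 23 old subject numbers and, per call, compares new_id against arithmetically constructed zero-padded sub ids, returning the s-prefixed two-digit old id of the matching number; A instead filters the forward dict by value and then runs a second preference loop over the collected keys (the s-key always wins there, which B's table encodes directly).
import Mathlib
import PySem

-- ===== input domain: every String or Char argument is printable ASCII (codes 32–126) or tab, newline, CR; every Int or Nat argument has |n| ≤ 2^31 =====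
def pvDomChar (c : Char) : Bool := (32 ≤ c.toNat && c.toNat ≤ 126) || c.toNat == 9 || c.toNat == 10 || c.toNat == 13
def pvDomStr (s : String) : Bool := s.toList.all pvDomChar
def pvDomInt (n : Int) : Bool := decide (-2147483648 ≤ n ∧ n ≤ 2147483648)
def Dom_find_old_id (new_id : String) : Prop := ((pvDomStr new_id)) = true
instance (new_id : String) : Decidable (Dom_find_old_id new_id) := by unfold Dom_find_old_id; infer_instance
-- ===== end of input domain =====

-- B replaces A's scan of the forward map (filter by value + preference loop) by a
-- compact numeric table and arithmetic construction of the ids; same value everywhere.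

-- the module constant _SUB_ID_MAP (insertion order preserved)
def subIdMap : List (String × String) := [
  ("P08", "sub-001"), ("s08", "sub-001"),
  ("P12", "sub-002"), ("s12", "sub-002"),
  ("P13", "sub-003"), ("s13", "sub-003"),
  ("P14", "sub-004"), ("s14", "sub-004"),
  ("P15", "sub-005"), ("s15", "sub-005"),
  ("P16", "sub-006"), ("s16", "sub-006"),
  ("P17", "sub-007"), ("s17", "sub-007"),
  ("P18", "sub-008"), ("s18", "sub-008"),
  ("P20", "sub-009"), ("s20", "sub-009"),
  ("P21", "sub-010"), ("s21", "sub-010"),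
  ("P22", "sub-011"), ("s22", "sub-011"),
  ("P24", "sub-012"), ("s24", "sub-012"),
  ("P25", "sub-013"), ("s25", "sub-013"),
  ("P26", "sub-014"), ("s26", "sub-014"),
  ("P27", "sub-015"), ("s27", "sub-015"),
  ("P28", "sub-016"), ("s28", "sub-016"),
  ("P30", "sub-017"), ("s30", "sub-017"),
  ("P31", "sub-018"), ("s31", "sub-018"),
  ("P32", "sub-019"), ("s32", "sub-019"),
  ("P33", "sub-020"), ("s33", "sub-020"),
  ("P34", "sub-021"), ("s34", "sub-021"),
  ("P35", "sub-022"), ("s35", "sub-022"),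
  ("P36", "sub-023"), ("s36", "sub-023")
]

-- ===== PORT A =====
def find_old_id (new_id : String) : Option String :=
  let old_ids := (subIdMap.filter (fun kv => kv.2 == new_id)).map (fun kv => kv.1)
  if old_ids.isEmpty then none
  else
    match old_ids.find? (fun old => PySem.Str.startswith old "s") with
    | some old => some old
    | none => PySem.List.pyGet? old_ids 0

-- ===== PORT B =====
-- the module constant _OLD_NUMS
def oldNums : List Int := [8, 12, 13, 14, 15, 16, 17, 18, 20, 21, 22, 24,
                           25, 26, 27, 28, 30, 31, 32, 33, 34, 35, 36]

-- "%03d" % i, exact for 0 ≤ i < 1000 (all i here are 1..23)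
def pad3 (i : Int) : String :=
  if i < 10 then "00" ++ PySem.Int.toStr i
  else if i < 100 then "0" ++ PySem.Int.toStr i
  else PySem.Int.toStr i

-- "%02d" % n, exact for 0 ≤ n < 100 (all n here are 8..36)
def pad2 (n : Int) : String :=
  if n < 10 then "0" ++ PySem.Int.toStr n else PySem.Int.toStr n

def find_old_id_alt (new_id : String) : Option String :=
  match (PySem.List.enumerate oldNums 1).find? (fun p => new_id == "sub-" ++ pad3 p.1) with
  | some p => some ("s" ++ pad2 p.2)
  | none => none

-- ===== PRECONDITION & SPEC =====
def Spec_find_old_id (new_id : String) (out : Option String) : Prop := out = find_old_id_alt new_id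
instance (new_id : String) (out : Option String) : Decidable (Spec_find_old_id new_id out) := by unfold Spec_find_old_id; infer_instance

-- ===== CLAIM (what is proved, stated in full; the proofs are below) =====
def Claim_equal_find_old_id : Prop := ∀ (new_id : String), Dom_find_old_id new_id → Spec_find_old_id new_id (find_old_id new_id)

-- ===== LEMMAS AND PROOFS =====

-- every value occurring in the forward map
def subVals : List String := subIdMap.map (fun kv => kv.2)

set_option maxRecDepth 8000 in
lemma snd_mem_subVals : ∀ kv ∈ subIdMap, kv.2 ∈ subVals := by decide

-- every key B constructs is one of the map's values
set_option maxRecDepth 8000 in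
lemma constructed_mem_subVals :
    ∀ p ∈ PySem.List.enumerate oldNums 1, ("sub-" ++ pad3 p.1) ∈ subVals := by decide

set_option maxRecDepth 8000 in
lemma agree_on_vals : ∀ s ∈ subVals, find_old_id s = find_old_id_alt s := by decide

lemma agree_off_vals (s : String) (hs : s ∉ subVals) : find_old_id s = find_old_id_alt s := by
  have hfilter : subIdMap.filter (fun kv => kv.2 == s) = [] := by
    rw [List.filter_eq_nil_iff]
    intro kv hkv
    simp only [beq_iff_eq]
    intro h
    exact hs (h ▸ snd_mem_subVals kv hkv)
  have hfind : (PySem.List.enumerate oldNums 1).find?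
      (fun p => s == "sub-" ++ pad3 p.1) = none := by
    rw [List.find?_eq_none]
    intro p hp
    simp only [beq_iff_eq]
    intro h
    exact hs (h ▸ constructed_mem_subVals p hp)
  simp [find_old_id, find_old_id_alt, hfilter, hfind]

-- ===== VERDICT (by name: the statement is the Claim_ definition above) =====
theorem find_old_id_spec : Claim_equal_find_old_id := by
  intro s _
  unfold Spec_find_old_id
  by_cases h : s ∈ subVals
  · exact agree_on_vals s h
  · exact agree_off_vals s h
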